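-- pv_equiv track=rewrite | github.com/AllanKoder/Competitive-Programming-Training | codeforces-practice/1017_div4/b.py | solve
-- ===== SOURCE A (Python) =====
-- def solve(m,l,r):
--     leftmost = min(0,l)
--     rightmost = max(0,r)
--
--
--     left = 0
--     right = 0
--     total = 0
--
--     while left > leftmost and total < m:
--         left -= 1
--         total += 1
--     while right < rightmost and total < m:
--         right += 1
--         total += 1
--
--     return [left, right]
-- ===== SOURCE B (Python) =====
-- def solve(m, l, r):
--     # Closed form: spend budget on the left first, remainder on the right.
--     budget = max(m, 0)
--     left = -min(budget, max(0, -l))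
--     right = min(budget + left, max(0, r))
--     return [left, right]
-- ===== Notes on version B (the rewrite author's own statement) =====
-- stated objective: faster
-- what changed: Replaces the two step-by-step while loops (one unit per iteration up to budget m) with direct O(1) arithmetic: left = -min(budget, max(0,-l)), right = min(budget+left, max(0,r)).
import Mathlib
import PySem

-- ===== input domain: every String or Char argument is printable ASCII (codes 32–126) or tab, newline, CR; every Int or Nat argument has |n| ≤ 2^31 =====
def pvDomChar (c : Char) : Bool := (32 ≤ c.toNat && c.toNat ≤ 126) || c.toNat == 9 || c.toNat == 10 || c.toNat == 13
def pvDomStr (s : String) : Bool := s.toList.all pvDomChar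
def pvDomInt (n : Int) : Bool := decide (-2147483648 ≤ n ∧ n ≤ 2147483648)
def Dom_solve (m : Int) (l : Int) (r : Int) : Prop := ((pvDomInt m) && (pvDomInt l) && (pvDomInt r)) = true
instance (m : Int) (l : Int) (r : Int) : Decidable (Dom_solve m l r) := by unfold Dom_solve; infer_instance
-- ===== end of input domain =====

-- B replaces A's two unit-step while loops with O(1) closed-form arithmetic (same return values).

-- ===== PORT A =====
-- the first while loop: while left > leftmost and total < m: left -= 1; total += 1
def solveLoopL (leftmost m left total : Int) : Int × Int :=
  if _h : leftmost < left ∧ total < m then solveLoopL leftmost m (left - 1) (total + 1)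
  else (left, total)
termination_by (left - leftmost).toNat
decreasing_by omega

-- the second while loop: while right < rightmost and total < m: right += 1; total += 1
def solveLoopR (rightmost m right total : Int) : Int × Int :=
  if _h : right < rightmost ∧ total < m then solveLoopR rightmost m (right + 1) (total + 1)
  else (right, total)
termination_by (rightmost - right).toNat
decreasing_by omega

def solve (m : Int) (l : Int) (r : Int) : List Int :=
  let leftmost := min 0 l
  let rightmost := max 0 r
  let p := solveLoopL leftmost m 0 0
  let q := solveLoopR rightmost m 0 p.2
  [p.1, q.1]

-- ===== PORT B =====
def solve_alt (m : Int) (l : Int) (r : Int) : List Int :=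
  let budget := max m 0
  let left := -(min budget (max 0 (-l)))
  let right := min (budget + left) (max 0 r)
  [left, right]

-- ===== PRECONDITION & SPEC =====
def Spec_solve (m : Int) (l : Int) (r : Int) (out : List Int) : Prop := out = solve_alt m l r
instance (m : Int) (l : Int) (r : Int) (out : List Int) : Decidable (Spec_solve m l r out) := by unfold Spec_solve; infer_instance

-- ===== CLAIM (what is proved, stated in full; the proofs are below) =====
def Claim_equal_solve : Prop := ∀ (m : Int) (l : Int) (r : Int), Dom_solve m l r → Spec_solve m l r (solve m l r)

-- ===== LEMMAS AND PROOFS =====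
theorem solveLoopL_eq (leftmost m : Int) : ∀ (left total : Int), leftmost ≤ left →
    solveLoopL leftmost m left total =
      (left - min (left - leftmost) (max (m - total) 0),
       total + min (left - leftmost) (max (m - total) 0)) := by
  intro left total hle
  induction left, total using solveLoopL.induct leftmost m with
  | case1 left total h ih =>
      rw [solveLoopL, dif_pos h, ih (by omega)]
      simp only [Prod.mk.injEq]; omega
  | case2 left total h =>
      rw [solveLoopL, dif_neg h]
      simp only [Prod.mk.injEq]; omega

theorem solveLoopR_eq (rightmost m : Int) : ∀ (right total : Int), right ≤ rightmost →
    solveLoopR rightmost m right total =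
      (right + min (rightmost - right) (max (m - total) 0),
       total + min (rightmost - right) (max (m - total) 0)) := by
  intro right total hle
  induction right, total using solveLoopR.induct rightmost m with
  | case1 right total h ih =>
      rw [solveLoopR, dif_pos h, ih (by omega)]
      simp only [Prod.mk.injEq]; omega
  | case2 right total h =>
      rw [solveLoopR, dif_neg h]
      simp only [Prod.mk.injEq]; omega

-- ===== VERDICT (by name: the statement is the Claim_ definition above) =====
theorem solve_spec : Claim_equal_solve := by
  intro m l r _
  show solve m l r = solve_alt m l r
  unfold solve solve_alt
  simp only []
  rw [solveLoopL_eq (min 0 l) m 0 0 (by omega),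
      solveLoopR_eq (max 0 r) m 0 _ (by omega)]
  simp only [List.cons.injEq, and_true]
  constructor <;> omega
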